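-- pv_equiv track=rewrite | github.com/francocamila/NLP-information-extractor | pdfTreatment/ementa_with_name.py | ementa_extract
-- ===== SOURCE A (Python) =====
-- def ementa_extract(paragraphs):
--     '''
--     Extracts the ementas from pdf's.
--     Receives the text and returns the ementa.
--     '''
--     texts = []
--     start = "assunto:"
--     ends = ["vistos", "acordam"]
--     mark = 0
--
--     for paragraph in paragraphs:
--         comparative_paragraph = paragraph.lower()
--         if start in comparative_paragraph:
--             mark = 1
--         for end in ends:
--             if end in comparative_paragraph:
--                 mark = 2
--         if mark == 1:
--             texts.append(paragraph)
--         if mark == 2: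
--             break
--     ementa = '\n'.join(texts)
--     return ementa
-- ===== SOURCE B (Python) =====
-- def ementa_extract(paragraphs):
--     '''
--     Extracts the ementas from pdf's.
--     Receives the text and returns the ementa.
--     '''
--     start_idx = next((i for i, p in enumerate(paragraphs)
--                       if "assunto:" in p.lower()), None)
--     end_idx = next((i for i, p in enumerate(paragraphs)
--                     if "vistos" in p.lower() or "acordam" in p.lower()),
--                    len(paragraphs))
--     if start_idx is None or start_idx >= end_idx:
--         return ""
--     return "\n".join(paragraphs[start_idx:end_idx])
-- ===== Notes on version B (the rewrite author's own statement) =====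
-- stated objective: simpler
-- what changed: Replaces the mutable-flag state machine (mark 0/1/2 threaded through one loop with append/break) by two independent first-match index searches followed by a single slice-and-join.
import Mathlib
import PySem

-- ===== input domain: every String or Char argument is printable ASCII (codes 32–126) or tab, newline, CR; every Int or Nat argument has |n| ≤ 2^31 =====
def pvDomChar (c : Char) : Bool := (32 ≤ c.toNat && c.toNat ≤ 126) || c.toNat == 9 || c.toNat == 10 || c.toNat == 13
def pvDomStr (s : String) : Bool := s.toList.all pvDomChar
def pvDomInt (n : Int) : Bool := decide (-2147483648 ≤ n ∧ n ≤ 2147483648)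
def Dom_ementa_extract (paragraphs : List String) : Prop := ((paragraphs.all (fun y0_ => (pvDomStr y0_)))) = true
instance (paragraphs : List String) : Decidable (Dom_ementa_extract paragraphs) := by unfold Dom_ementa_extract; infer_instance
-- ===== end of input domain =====

-- B replaces A's mutable-flag (mark 0/1/2) single-pass state machine by two first-match
-- index searches followed by one slice-and-join (objective: simpler).


-- ===== PORT A =====
-- A's loop: texts/mark threaded through the paragraphs; 'break' = stop recursing when mark = 2.
def ementaLoop : List String → Int → List String → List String
  | [], _, texts => texts
  | p :: rest, mark, texts =>
    let cp := PySem.Str.lower p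
    let mark1 := if PySem.Str.isIn "assunto:" cp then 1 else mark
    -- for end in ["vistos", "acordam"]: if end in cp: mark = 2
    let mark2 := (["vistos", "acordam"].foldl (fun m e => if PySem.Str.isIn e cp then 2 else m) mark1 : Int)
    let texts' := if mark2 == 1 then texts ++ [p] else texts
    if mark2 == 2 then texts' else ementaLoop rest mark2 texts'

def ementa_extract (paragraphs : List String) : String :=
  PySem.Str.join "\n" (ementaLoop paragraphs 0 [])

-- ===== PORT B =====
def pvIsStart (p : String) : Bool := PySem.Str.isIn "assunto:" (PySem.Str.lower p)
def pvIsEnd (p : String) : Bool :=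
  PySem.Str.isIn "vistos" (PySem.Str.lower p) || PySem.Str.isIn "acordam" (PySem.Str.lower p)

def ementa_extract_alt (paragraphs : List String) : String :=
  let start_idx := paragraphs.findIdx? pvIsStart
  let end_idx := (paragraphs.findIdx? pvIsEnd).getD paragraphs.length
  match start_idx with
  | none => ""
  | some s =>
      if end_idx ≤ s then ""
      else PySem.Str.join "\n" (PySem.List.slice paragraphs (some (s : Int)) (some (end_idx : Int)))

-- ===== PRECONDITION & SPEC =====
def Spec_ementa_extract (paragraphs : List String) (out : String) : Prop := out = ementa_extract_alt paragraphs
instance (paragraphs : List String) (out : String) : Decidable (Spec_ementa_extract paragraphs out) := by unfold Spec_ementa_extract; infer_instance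

-- ===== CLAIM (what is proved, stated in full; the proofs are below) =====
def Claim_equal_ementa_extract : Prop := ∀ (paragraphs : List String), Dom_ementa_extract paragraphs → Spec_ementa_extract paragraphs (ementa_extract paragraphs)

-- ===== LEMMAS AND PROOFS =====

-- one step of A's loop, phrased through the two predicates B searches with
set_option maxHeartbeats 2000000 in
theorem ementaLoop_cons (p : String) (rest : List String) (mark : Int) (texts : List String) :
    ementaLoop (p :: rest) mark texts =
      (let mark2 : Int := if pvIsEnd p then 2 else if pvIsStart p then 1 else mark
       let texts' := if mark2 == 1 then texts ++ [p] else texts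
       if mark2 == 2 then texts' else ementaLoop rest mark2 texts') := by
  rw [ementaLoop]
  simp only [List.foldl_cons, List.foldl_nil, pvIsEnd, pvIsStart]
  by_cases h1 : PySem.Str.isIn "vistos" (PySem.Str.lower p) = true <;>
  by_cases h2 : PySem.Str.isIn "acordam" (PySem.Str.lower p) = true <;>
  by_cases h3 : PySem.Str.isIn "assunto:" (PySem.Str.lower p) = true <;>
  simp only [h1, h2, h3, Bool.false_eq_true, if_true, if_false, Bool.or_self,
    Bool.false_or, Bool.or_true] <;> rfl

-- once mark = 1, A appends every paragraph up to (excluding) the first end-marked one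
theorem ementaLoop_one (rest : List String) : ∀ texts,
    ementaLoop rest 1 texts = texts ++ rest.takeWhile (fun p => !pvIsEnd p) := by
  induction rest with
  | nil => intro t; simp [ementaLoop]
  | cons p r ih =>
    intro t
    rw [ementaLoop_cons]
    by_cases hE : pvIsEnd p <;> simp [hE, List.takeWhile_cons, ih]

-- the prefix of a list up to its first pvIsEnd element, as take of the found index
theorem take_findIdx_end (xs : List String) :
    xs.take ((xs.findIdx? pvIsEnd).getD xs.length) = xs.takeWhile (fun p => !pvIsEnd p) := by
  induction xs with
  | nil => rfl
  | cons p r ih =>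
    by_cases hE : pvIsEnd p
    · simp [List.findIdx?_cons, hE, List.takeWhile_cons]
    · simp [List.findIdx?_cons, hE, List.takeWhile_cons]
      cases h : r.findIdx? pvIsEnd <;> simp [h] at ih ⊢ <;> simpa using ih

-- the list A collects equals the list B slices, for mark = 0
theorem ementaLoop_zero (ps : List String) :
    ementaLoop ps 0 [] =
      (match ps.findIdx? pvIsStart with
       | none => []
       | some s =>
           let e := (ps.findIdx? pvIsEnd ).getD ps.length
           if e ≤ s then [] else (ps.drop s).take (e - s)) := by
  induction ps with
  | nil => rfl
  | cons p r ih =>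
    rw [ementaLoop_cons]
    by_cases hE : pvIsEnd p
    · -- end marker first: A breaks with nothing appended; B's end index is 0
      simp only [hE, if_true]
      by_cases hS : pvIsStart p <;>
        simp [List.findIdx?_cons, hE, hS] <;>
          cases h : r.findIdx? pvIsStart <;> simp [h]
    · by_cases hS : pvIsStart p
      · -- start found here: A switches to mark = 1 and appends from p on
        simp only [hE, hS, if_true, Bool.false_eq_true, if_false]
        rw [show ((1:Int) == 1) = true from rfl, show ((1:Int) == 2) = false from rfl]
        simp only [if_true, Bool.false_eq_true, if_false]
        rw [ementaLoop_one, List.findIdx?_cons]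
        simp only [hS, if_true]
        rw [List.findIdx?_cons]
        simp only [hE, Bool.false_eq_true, if_false]
        cases h : r.findIdx? pvIsEnd with
        | none =>
          simp [h, List.takeWhile_cons, ← take_findIdx_end]
        | some e =>
          have hne : ¬ ((e : Nat) + 1 ≤ 0) := by omega
          simp only [h, Option.map_some, Option.getD_some, if_neg hne,
            List.drop_zero, Nat.add_sub_cancel, List.take_succ_cons]
          simp [List.takeWhile_cons, ← take_findIdx_end, h]
      · -- neither marker: both sides shift by one paragraph
        simp only [hE, hS, Bool.false_eq_true, if_false]
        rw [show ((0:Int) == 1) = false from rfl, show ((0:Int) == 2) = false from rfl]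
        simp only [Bool.false_eq_true, if_false]
        rw [ih, List.findIdx?_cons, List.findIdx?_cons]
        simp only [hS, hE, Bool.false_eq_true, if_false]
        cases hs : r.findIdx? pvIsStart with
        | none => simp
        | some s =>
          cases he : r.findIdx? pvIsEnd with
          | none => simp [List.length_cons]
          | some e =>
            simp only [Option.map_some, Option.getD_some, List.length_cons]
            by_cases hle : e ≤ s
            · simp [hle]
            · have h2 : ¬ (e + 1 ≤ s + 1) := by omega
              simp [hle, h2, List.drop_succ_cons]

-- ===== VERDICT (by name: the statement is the Claim_ definition above) =====
theorem ementa_extract_spec : Claim_equal_ementa_extract := by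
  intro ps _
  unfold Spec_ementa_extract ementa_extract ementa_extract_alt
  rw [ementaLoop_zero]
  cases hs : ps.findIdx? pvIsStart with
  | none => exact (by decide : PySem.Str.join "\n" [] = "")
  | some s =>
    simp only
    by_cases hle : (ps.findIdx? pvIsEnd).getD ps.length ≤ s
    · simp only [hle, if_true]
      exact (by decide : PySem.Str.join "\n" [] = "")
    · have hcast : PySem.List.slice ps (some (s : Int))
          (some (((ps.findIdx? pvIsEnd).getD ps.length : Nat) : Int)) =
          (ps.drop s).take ((ps.findIdx? pvIsEnd).getD ps.length - s) :=
        PySem.List.slice_natCast ps s _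
      simp [hle, hcast]
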